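-- pv_equiv track=rewrite | github.com/abaldeg/EjerciciosPython | Practica antes Examen.py | comparalistas
-- ===== SOURCE A (Python) =====
-- def comparalistas(lista1,lista2):
--     largo1=len(lista1)
--     largo2=len(lista2)
--     exacto=0
--     aprox=0
--     for i in range(largo1):
--         for j in range (largo2):
--             if lista1[i]==lista2[j] and i==j:
--                 exacto=exacto+1
--             elif lista1[i]==lista2[j]:
--                 aprox=aprox+1
--     return exacto, aprox
-- ===== SOURCE B (Python) =====
-- def comparalistas(lista1, lista2):
--     # Count occurrences of each value of lista2 once, then:
--     # total equal pairs = sum over v in lista1 of count2[v];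
--     # exacto = same-index matches (one zip pass); aprox = total - exacto.
--     c2 = {}
--     for v in lista2:
--         c2[v] = c2.get(v, 0) + 1
--     total = 0
--     for v in lista1:
--         total += c2.get(v, 0)
--     exacto = 0
--     for x, y in zip(lista1, lista2):
--         if x == y:
--             exacto += 1
--     return exacto, total - exacto
-- ===== Notes on version B (the rewrite author's own statement) =====
-- stated objective: faster
-- what changed: Replaces the nested O(n*m) index loops by a hash counter of lista2 built once: total matching pairs = sum of counts over lista1, exacto from a single zip pass over the diagonal, aprox = total - exacto.
import Mathlib
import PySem

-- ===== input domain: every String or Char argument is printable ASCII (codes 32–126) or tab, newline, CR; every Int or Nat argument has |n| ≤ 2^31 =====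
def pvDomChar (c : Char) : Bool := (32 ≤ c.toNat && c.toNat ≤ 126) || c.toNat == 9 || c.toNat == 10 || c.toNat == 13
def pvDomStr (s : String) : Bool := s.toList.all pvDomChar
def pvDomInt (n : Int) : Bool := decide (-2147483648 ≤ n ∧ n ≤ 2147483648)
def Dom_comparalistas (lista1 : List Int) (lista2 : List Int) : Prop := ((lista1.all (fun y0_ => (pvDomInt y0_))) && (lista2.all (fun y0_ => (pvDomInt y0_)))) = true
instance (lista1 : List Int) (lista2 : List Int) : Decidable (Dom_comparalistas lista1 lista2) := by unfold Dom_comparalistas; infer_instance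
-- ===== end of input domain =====

-- ===== PORT A =====
-- B replaces A's nested O(n*m) index loops by a one-pass hash counter (measured faster at large sizes).
def comparalistas (lista1 : List Int) (lista2 : List Int) : Int × Int :=
  let largo1 : Int := PySem.List.len lista1
  let largo2 : Int := PySem.List.len lista2
  let s :=
    (PySem.List.pyRange 0 largo1 1).foldl (fun (s : Int × Int) i =>
      (PySem.List.pyRange 0 largo2 1).foldl (fun (s : Int × Int) j =>
        if PySem.List.pyGetD lista1 i 0 = PySem.List.pyGetD lista2 j 0 ∧ i = j then (s.1 + 1, s.2)
        else if PySem.List.pyGetD lista1 i 0 = PySem.List.pyGetD lista2 j 0 then (s.1, s.2 + 1)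
        else s) s) ((0 : Int), (0 : Int))
  s

-- ===== PORT B =====
def comparalistas_alt (lista1 : List Int) (lista2 : List Int) : Int × Int :=
  let c2 := lista2.foldl (fun (d : PySem.Dict Int Int) v => d.insert v (d.getD v 0 + 1)) PySem.Dict.empty
  let total := lista1.foldl (fun (t : Int) v => t + c2.getD v 0) 0
  let exacto := (lista1.zip lista2).foldl (fun (e : Int) (p : Int × Int) => if p.1 = p.2 then e + 1 else e) 0
  (exacto, total - exacto)

-- ===== PRECONDITION & SPEC =====
def Spec_comparalistas (lista1 : List Int) (lista2 : List Int) (out : Int × Int) : Prop := out = comparalistas_alt lista1 lista2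
instance (lista1 : List Int) (lista2 : List Int) (out : Int × Int) : Decidable (Spec_comparalistas lista1 lista2 out) := by unfold Spec_comparalistas; infer_instance

-- ===== CLAIM (what is proved, stated in full; the proofs are below) =====
def Claim_equal_comparalistas : Prop := ∀ (lista1 : List Int) (lista2 : List Int), Dom_comparalistas lista1 lista2 → Spec_comparalistas lista1 lista2 (comparalistas lista1 lista2)

-- ===== LEMMAS AND PROOFS =====

-- common specification: exacto = same-index matches, total = all matching pairs
def Ecnt (l1 l2 : List Int) : Int := (((l1.zip l2).countP (fun p => decide (p.1 = p.2)) : Nat) : Int)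
def Tcnt (l1 l2 : List Int) : Int := (l1.map (fun v => ((l2.count v : Nat) : Int))).sum

-- B side ---------------------------------------------------------------
lemma alt_counter (l : List Int) (d : PySem.Dict Int Int) (x : Int) :
    (l.foldl (fun d v => d.insert v (d.getD v 0 + 1)) d).getD x 0 = d.getD x 0 + (l.count x : Int) := by
  induction l generalizing d with
  | nil => simp
  | cons y ys ih =>
    simp only [List.foldl_cons, ih, PySem.Dict.getD_insert, List.count_cons]
    by_cases h : x = y
    · simp [h]; ring
    · simp [h, Ne.symm h]

lemma alt_eq (l1 l2 : List Int) : comparalistas_alt l1 l2 = (Ecnt l1 l2, Tcnt l1 l2 - Ecnt l1 l2) := by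
  have hB : comparalistas_alt l1 l2 =
      ((l1.zip l2).foldl (fun (e : Int) (p : Int × Int) => if p.1 = p.2 then e + 1 else e) 0,
       l1.foldl (fun (t : Int) v =>
         t + (l2.foldl (fun (d : PySem.Dict Int Int) v => d.insert v (d.getD v 0 + 1)) PySem.Dict.empty).getD v 0) 0
       - (l1.zip l2).foldl (fun (e : Int) (p : Int × Int) => if p.1 = p.2 then e + 1 else e) 0) := rfl
  rw [hB, PySem.List.foldl_ite_add_one, PySem.List.foldl_add]
  unfold Ecnt Tcnt
  simp [alt_counter]

-- A side ---------------------------------------------------------------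
lemma inner_fold (v i : Int) (l2 : List Int) (J : List Int) (e a : Int) :
    J.foldl (fun (s : Int × Int) j =>
        if v = PySem.List.pyGetD l2 j 0 ∧ i = j then (s.1 + 1, s.2)
        else if v = PySem.List.pyGetD l2 j 0 then (s.1, s.2 + 1)
        else s) (e, a)
    = (e + (J.countP (fun j => decide (v = PySem.List.pyGetD l2 j 0) && decide (i = j)) : Int),
       a + (J.countP (fun j => decide (v = PySem.List.pyGetD l2 j 0) && !decide (i = j)) : Int)) := by
  induction J generalizing e a with
  | nil => simp
  | cons j J ih =>
    simp only [List.foldl_cons]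
    by_cases h1 : v = PySem.List.pyGetD l2 j 0
    · by_cases h2 : i = j
      · rw [if_pos ⟨h1, h2⟩, ih]
        simp only [List.countP_cons, h1, h2, decide_true, Bool.and_self,
          Bool.not_true, Bool.and_false, Prod.mk.injEq]
        constructor <;> push_cast <;> ring
      · rw [if_neg (by tauto), if_pos h1, ih]
        simp only [List.countP_cons, h1, h2, decide_true, decide_false, Bool.not_false,
          Bool.and_true, Bool.and_false, Prod.mk.injEq]
        constructor <;> push_cast <;> ring
    · rw [if_neg (by tauto), if_neg h1, ih]
      simp [List.countP_cons, h1]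
  
lemma countP_nodup_diag (l : List Int) (h : l.Nodup) (q : Int → Bool) (i : Int) :
    l.countP (fun j => q j && decide (i = j)) = if i ∈ l ∧ q i = true then 1 else 0 := by
  induction l with
  | nil => simp
  | cons a l ih =>
    simp only [List.nodup_cons] at h
    rw [List.countP_cons, ih h.2]
    by_cases hi : i = a
    · subst hi
      by_cases hq : q i = true
      · simp [h.1, hq]
      · simp [hq]
    · simp [hi, Ne.symm hi]

lemma countP_and_not (l : List Int) (q r : Int → Bool) :
    l.countP (fun x => q x && !r x) = l.countP q - l.countP (fun x => q x && r x) := by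
  induction l with
  | nil => simp
  | cons a l ih =>
    have hle : l.countP (fun x => q x && r x) ≤ l.countP q :=
      List.countP_mono_left (by intro x _ hx; simp only [Bool.and_eq_true] at hx; exact hx.1)
    rw [List.countP_cons, List.countP_cons, List.countP_cons, ih]
    by_cases h1 : q a = true <;> by_cases h2 : r a = true <;> simp [h1, h2] <;> omega

lemma countP_range_count (l2 : List Int) (v : Int) :
    (PySem.List.pyRange 0 (PySem.List.len l2) 1).countP (fun j => decide (v = PySem.List.pyGetD l2 j 0)) = l2.count v := by
  have hmap := PySem.List.map_pyGetD_pyRange_zero (xs := l2) (d := 0)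
  calc (PySem.List.pyRange 0 (PySem.List.len l2) 1).countP (fun j => decide (v = PySem.List.pyGetD l2 j 0))
      = ((PySem.List.pyRange 0 (PySem.List.len l2) 1).map (fun j => PySem.List.pyGetD l2 j 0)).countP (fun x => decide (v = x)) := by
        rw [List.countP_map]; rfl
    _ = l2.countP (fun x => decide (v = x)) := by rw [hmap]
    _ = l2.count v := by
        rw [List.count]
        refine List.countP_congr ?_
        intro x _
        by_cases h : v = x
        · simp [h]
        · simp [h, Ne.symm h]

def Dfun (l1 l2 : List Int) (i : Int) : Int :=
  if 0 ≤ i ∧ i < (l2.length : Int) ∧ PySem.List.pyGetD l1 i 0 = PySem.List.pyGetD l2 i 0 then 1 else 0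

def Cfun (l1 l2 : List Int) (i : Int) : Int := ((l2.count (PySem.List.pyGetD l1 i 0) : Nat) : Int)

lemma inner_range (l1 l2 : List Int) (i : Int) (e a : Int) :
    (PySem.List.pyRange 0 (PySem.List.len l2) 1).foldl (fun (s : Int × Int) j =>
        if PySem.List.pyGetD l1 i 0 = PySem.List.pyGetD l2 j 0 ∧ i = j then (s.1 + 1, s.2)
        else if PySem.List.pyGetD l1 i 0 = PySem.List.pyGetD l2 j 0 then (s.1, s.2 + 1)
        else s) (e, a)
    = (e + Dfun l1 l2 i, a + (Cfun l1 l2 i - Dfun l1 l2 i)) := by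
  rw [inner_fold (PySem.List.pyGetD l1 i 0) i l2 (PySem.List.pyRange 0 (PySem.List.len l2) 1) e a]
  set q : Int → Bool := fun j => decide (PySem.List.pyGetD l1 i 0 = PySem.List.pyGetD l2 j 0) with hqdef
  set R := PySem.List.pyRange 0 (PySem.List.len l2) 1 with hR
  have hnot := countP_and_not R q (fun j => decide (i = j))
  have hdle : R.countP (fun j => q j && decide (i = j)) ≤ R.countP q :=
    List.countP_mono_left (by intro x _ hx; simp only [Bool.and_eq_true] at hx; exact hx.1)
  have hcnt : R.countP q = l2.count (PySem.List.pyGetD l1 i 0) := countP_range_count l2 _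
  have hdiag := countP_nodup_diag R (by rw [hR]; exact PySem.List.nodup_pyRange_one 0 (PySem.List.len l2)) q i
  have hmem : i ∈ R ↔ 0 ≤ i ∧ i < (l2.length : Int) := by
    rw [hR, PySem.List.mem_pyRange_one]; simp
  unfold Dfun Cfun
  by_cases hd : 0 ≤ i ∧ i < (l2.length : Int) ∧ PySem.List.pyGetD l1 i 0 = PySem.List.pyGetD l2 i 0
  · have h1 : R.countP (fun j => q j && decide (i = j)) = 1 := by
      rw [hdiag, if_pos ⟨hmem.mpr ⟨hd.1, hd.2.1⟩, by simp [hqdef, hd.2.2]⟩]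
    have h1le : 1 ≤ R.countP q := h1 ▸ hdle
    rw [hnot, h1, hcnt, if_pos hd, Prod.mk.injEq]
    constructor
    · push_cast; ring
    · rw [Nat.cast_sub (hcnt ▸ h1le)]; push_cast; ring
  · have h0 : R.countP (fun j => q j && decide (i = j)) = 0 := by
      rw [hdiag, if_neg]
      intro hc
      exact hd ⟨(hmem.mp hc.1).1, (hmem.mp hc.1).2, by simpa [hqdef] using hc.2⟩
    rw [hnot, h0, hcnt, if_neg hd, Prod.mk.injEq]
    constructor
    · push_cast; ring
    · rw [Nat.sub_zero]; push_cast; ring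

lemma outer_fold (l1 l2 : List Int) (I : List Int) (e a : Int) :
    I.foldl (fun (s : Int × Int) i =>
      (PySem.List.pyRange 0 (PySem.List.len l2) 1).foldl (fun (s : Int × Int) j =>
        if PySem.List.pyGetD l1 i 0 = PySem.List.pyGetD l2 j 0 ∧ i = j then (s.1 + 1, s.2)
        else if PySem.List.pyGetD l1 i 0 = PySem.List.pyGetD l2 j 0 then (s.1, s.2 + 1)
        else s) s) (e, a)
    = (e + (I.map (Dfun l1 l2)).sum, a + (I.map (fun i => Cfun l1 l2 i - Dfun l1 l2 i)).sum) := by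
  induction I generalizing e a with
  | nil => simp
  | cons i I ih =>
    simp only [List.foldl_cons, List.map_cons, List.sum_cons]
    rw [inner_range l1 l2 i e a, ih]
    rw [Prod.mk.injEq]
    constructor <;> ring

lemma sum_map_sub (I : List Int) (f g : Int → Int) :
    (I.map (fun i => f i - g i)).sum = (I.map f).sum - (I.map g).sum := by
  induction I with
  | nil => simp
  | cons i I ih => simp [ih]; ring

lemma range_zip_countP (l1 l2 : List Int) :
    (List.range l1.length).countP (fun (k : Nat) => decide ((k : Int) < (l2.length : Int) ∧ l1.getD k 0 = l2.getD k 0))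
    = (l1.zip l2).countP (fun p => decide (p.1 = p.2)) := by
  induction l1 generalizing l2 with
  | nil => simp
  | cons x xs ih =>
    cases l2 with
    | nil =>
      simp only [List.zip_nil_right, List.countP_nil]
      refine List.countP_eq_zero.mpr ?_
      intro k _
      simp
    | cons y ys =>
      rw [show (x :: xs).length = xs.length + 1 from rfl, List.range_succ_eq_map,
        List.countP_cons, List.countP_map, List.zip_cons_cons, List.countP_cons]
      have hh : (List.range xs.length).countP
          ((fun (k : Nat) => decide ((k : Int) < (((y :: ys).length : Nat) : Int) ∧ (x :: xs).getD k 0 = (y :: ys).getD k 0)) ∘ Nat.succ)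
          = (xs.zip ys).countP (fun p => decide (p.1 = p.2)) := by
        rw [← ih ys]
        refine List.countP_congr ?_
        intro k _
        simp only [Function.comp, Nat.succ_eq_add_one, List.getD_cons_succ, decide_eq_true_eq]
        constructor
        · intro hp
          refine ⟨?_, hp.2⟩
          have h1 := hp.1
          simp only [List.length_cons] at h1
          push_cast at h1 ⊢
          omega
        · intro hp
          refine ⟨?_, hp.2⟩
          have h1 := hp.1
          simp only [List.length_cons]
          push_cast at h1 ⊢
          omega
      rw [hh]
      have h0 : ((0 : Nat) : Int) < (((y :: ys).length : Nat) : Int) := by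
        simp only [List.length_cons]; push_cast; omega
      simp [h0]

lemma sum_map_Dfun (R : List Int) (l1 l2 : List Int) :
    (R.map (Dfun l1 l2)).sum
    = ((R.countP (fun i => decide (0 ≤ i ∧ i < (l2.length : Int) ∧ PySem.List.pyGetD l1 i 0 = PySem.List.pyGetD l2 i 0)) : Nat) : Int) := by
  induction R with
  | nil => simp
  | cons r R ih =>
    rw [List.map_cons, List.sum_cons, List.countP_cons, ih]
    unfold Dfun
    by_cases hd : 0 ≤ r ∧ r < (l2.length : Int) ∧ PySem.List.pyGetD l1 r 0 = PySem.List.pyGetD l2 r 0 <;>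
      simp [hd] <;> push_cast <;> ring

lemma sum_D_eq (l1 l2 : List Int) :
    ((PySem.List.pyRange 0 (PySem.List.len l1) 1).map (Dfun l1 l2)).sum = Ecnt l1 l2 := by
  rw [sum_map_Dfun]
  unfold Ecnt
  rw [← range_zip_countP l1 l2]
  have hr : PySem.List.pyRange 0 (PySem.List.len l1) 1 = (List.range l1.length).map (fun (k : Nat) => ((k : Nat) : Int)) := by
    rw [PySem.List.len_eq]
    exact PySem.List.pyRange_zero_natCast l1.length
  rw [hr, List.countP_map]
  congr 1
  refine List.countP_congr ?_
  intro k hk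
  simp [Function.comp, PySem.List.pyGetD_natCast]

lemma sum_C_eq (l1 l2 : List Int) :
    ((PySem.List.pyRange 0 (PySem.List.len l1) 1).map (Cfun l1 l2)).sum = Tcnt l1 l2 := by
  unfold Cfun Tcnt
  have hmap := PySem.List.map_pyGetD_pyRange_zero (xs := l1) (d := 0)
  calc ((PySem.List.pyRange 0 (PySem.List.len l1) 1).map (fun i => ((l2.count (PySem.List.pyGetD l1 i 0) : Nat) : Int))).sum
      = (((PySem.List.pyRange 0 (PySem.List.len l1) 1).map (fun i => PySem.List.pyGetD l1 i 0)).map (fun v => ((l2.count v : Nat) : Int))).sum := by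
        rw [List.map_map]; rfl
    _ = (l1.map (fun v => ((l2.count v : Nat) : Int))).sum := by rw [hmap]

lemma a_eq (l1 l2 : List Int) : comparalistas l1 l2 = (Ecnt l1 l2, Tcnt l1 l2 - Ecnt l1 l2) := by
  have hA : comparalistas l1 l2 =
      (PySem.List.pyRange 0 (PySem.List.len l1) 1).foldl (fun (s : Int × Int) i =>
        (PySem.List.pyRange 0 (PySem.List.len l2) 1).foldl (fun (s : Int × Int) j =>
          if PySem.List.pyGetD l1 i 0 = PySem.List.pyGetD l2 j 0 ∧ i = j then (s.1 + 1, s.2)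
          else if PySem.List.pyGetD l1 i 0 = PySem.List.pyGetD l2 j 0 then (s.1, s.2 + 1)
          else s) s) ((0 : Int), (0 : Int)) := rfl
  rw [hA, outer_fold l1 l2 _ 0 0, sum_map_sub _ (Cfun l1 l2) (Dfun l1 l2), sum_D_eq, sum_C_eq]
  rw [Prod.mk.injEq]
  constructor <;> ring

-- ===== VERDICT (by name: the statement is the Claim_ definition above) =====
theorem comparalistas_spec : Claim_equal_comparalistas := by
  intro l1 l2 _
  unfold Spec_comparalistas
  rw [a_eq, alt_eq]
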